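-- pv_equiv track=rewrite | github.com/tessdonnelly/aoc2022 | day06.py | process_buffer
-- ===== SOURCE A (Python) =====
-- def process_buffer(input,part):
--     if part == 1:
--         n = 4
--     elif part == 2:
--         n = 14
--     for i in range(n-1,len(input)):
--         lastn = set()
--         for j in range(i, i-n, -1):
--             lastn.add(input[j])
--         if len(lastn) == n:
--             return i+1
-- ===== SOURCE B (Python) =====
-- def process_buffer(input, part):
--     if part == 1:
--         n = 4
--     elif part == 2:
--         n = 14
--     counts = {}
--     distinct = 0
--     for i, c in enumerate(input):
--         cc = counts.get(c, 0) + 1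
--         counts[c] = cc
--         if cc == 1:
--             distinct += 1
--         if i >= n:
--             d = input[i - n]
--             cd = counts[d] - 1
--             counts[d] = cd
--             if cd == 0:
--                 distinct -= 1
--         if distinct == n:
--             return i + 1
-- ===== Notes on version B (the rewrite author's own statement) =====
-- stated objective: faster
-- what changed: Replaces A's per-position rebuild of the last-n character set (an inner n-element loop for every position) by a single sliding-window pass maintaining a dict of window character counts and a running distinct counter.
import Mathlib
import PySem

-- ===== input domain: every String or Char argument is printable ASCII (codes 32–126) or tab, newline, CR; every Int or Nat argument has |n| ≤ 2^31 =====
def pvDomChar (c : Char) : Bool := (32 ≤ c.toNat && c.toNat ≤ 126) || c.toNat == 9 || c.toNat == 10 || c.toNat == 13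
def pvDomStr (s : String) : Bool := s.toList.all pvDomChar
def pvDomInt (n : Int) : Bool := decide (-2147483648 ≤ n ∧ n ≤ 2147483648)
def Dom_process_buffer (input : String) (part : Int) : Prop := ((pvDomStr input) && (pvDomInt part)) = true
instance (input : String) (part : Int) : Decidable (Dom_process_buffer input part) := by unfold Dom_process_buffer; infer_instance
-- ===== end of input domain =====

-- ===== PORT A =====
-- B replaces A's per-position rebuild of the last-n set by a single sliding-window pass
-- (objective: faster). Loop of A: 'for i in range(n-1, len(input))' with early return;
-- the inner loop builds the set of the last n characters. input[j] is ported with pyGetD: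
-- for every i the loop reaches, j is provably in range (Python never raises there).
def process_buffer_loop (cs : List Char) (n : Int) : List Int → Option Int
  | [] => none
  | i :: rest =>
      let lastn := (PySem.List.pyRange i (i - n) (-1)).foldl
        (fun s j => PySem.Set.add s (PySem.List.pyGetD cs j ' ')) PySem.Set.empty
      if (lastn.length : Int) = n then some (i + 1) else process_buffer_loop cs n rest

-- Python leaves n unbound when part ∉ {1, 2} (UnboundLocalError at the loop): outside Pre_.
def process_buffer (input : String) (part : Int) : Option Int :=
  if part = 1 then
    process_buffer_loop input.toList 4 (PySem.List.pyRange 3 (PySem.Str.len input))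
  else if part = 2 then
    process_buffer_loop input.toList 14 (PySem.List.pyRange 13 (PySem.Str.len input))
  else none

-- ===== PORT B =====
-- Sliding-window counter: one pass over enumerate(input); a dict of character counts for
-- the current window and a running count of distinct characters in it. input[i-n] and
-- counts[d] are ported with pyGetD/getD: when that branch runs, the index is provably in
-- range and the key provably present (Python never raises there).
def process_buffer_alt_loop (cs : List Char) (n : Int) :
    List (Int × Char) → PySem.Dict Char Int → Int → Option Int
  | [], _, _ => none
  | (i, c) :: rest, counts, distinct =>
      let cc := counts.getD c 0 + 1
      let counts1 := counts.insert c cc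
      let distinct1 := if cc = 1 then distinct + 1 else distinct
      let st :=
        if n ≤ i then
          let d := PySem.List.pyGetD cs (i - n) ' '
          let cd := counts1.getD d 0 - 1
          (counts1.insert d cd, if cd = 0 then distinct1 - 1 else distinct1)
        else (counts1, distinct1)
      if st.2 = n then some (i + 1) else process_buffer_alt_loop cs n rest st.1 st.2

def process_buffer_alt (input : String) (part : Int) : Option Int :=
  if part = 1 then
    process_buffer_alt_loop input.toList 4 (PySem.List.enumerate input.toList) PySem.Dict.empty 0
  else if part = 2 then
    process_buffer_alt_loop input.toList 14 (PySem.List.enumerate input.toList) PySem.Dict.empty 0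
  else none

-- ===== PRECONDITION & SPEC =====
-- Pre_ excludes exactly part ∉ {1, 2}, where Python A raises UnboundLocalError ('n' unbound).
def Pre_process_buffer (input : String) (part : Int) : Prop := part = 1 ∨ part = 2
instance (input : String) (part : Int) : Decidable (Pre_process_buffer input part) := by
  unfold Pre_process_buffer; infer_instance

def pvWitness_process_buffer : String × Int := ("abcdab", 1)

def Spec_process_buffer (input : String) (part : Int) (out : Option Int) : Prop := out = process_buffer_alt input part
instance (input : String) (part : Int) (out : Option Int) : Decidable (Spec_process_buffer input part out) := by unfold Spec_process_buffer; infer_instance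

-- ===== CLAIM (what is proved, stated in full; the proofs are below) =====
def Claim_equal_process_buffer : Prop := ∀ (input : String) (part : Int), Dom_process_buffer input part → Pre_process_buffer input part → Spec_process_buffer input part (process_buffer input part)

-- ===== LEMMAS AND PROOFS =====

-- The window of the last (at most) nn characters among the first k characters.
def pvW (cs : List Char) (nn k : Nat) : List Char := (cs.take k).drop (k - nn)

-- Number of distinct characters of a list.
def pvD (xs : List Char) : Nat := (PySem.Set.ofList xs).length

-- Reference search: first k (fuel m steps) whose window pvW cs nn (k+1) has nn distinct chars.
def pvFirst (cs : List Char) (nn : Nat) : Nat → Nat → Option Int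
  | _, 0 => none
  | k, m+1 => if pvD (pvW cs nn (k+1)) = nn then some ((k : Int) + 1) else pvFirst cs nn (k+1) m

lemma pvD_le (xs : List Char) : pvD xs ≤ xs.length := PySem.Set.length_ofList_le xs

lemma countP_not_add (l : List Char) (p : Char → Bool) :
    l.countP p + l.countP (fun a => !(p a)) = l.length := by
  induction l with
  | nil => simp
  | cons a t ih => by_cases h : p a <;> simp [h] <;> omega

lemma pvD_append_singleton (xs : List Char) (x : Char) :
    pvD (xs ++ [x]) = if x ∈ xs then pvD xs else pvD xs + 1 := by
  rw [pvD, PySem.Set.ofList_append_singleton, PySem.Set.add_eq_ite]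
  by_cases hx : x ∈ xs
  · simp [PySem.Set.mem_ofList, hx, pvD]
  · simp [PySem.Set.mem_ofList, hx, pvD]

lemma pvD_cons (x : Char) (xs : List Char) :
    pvD (x :: xs) = if x ∈ xs then pvD xs else pvD xs + 1 := by
  rw [pvD, PySem.Set.ofList_cons]
  by_cases hx : x ∈ xs
  · have hmem : x ∈ PySem.Set.ofList xs := by rw [PySem.Set.mem_ofList]; exact hx
    have hnd := PySem.Set.nodup_ofList (α := Char) xs
    have hcount : (PySem.Set.ofList xs).count x = 1 := List.count_eq_one_of_mem hnd hmem
    have : (PySem.Set.discard (PySem.Set.ofList xs) x).length + 1 = (PySem.Set.ofList xs).length := by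
      have hsplit := countP_not_add (PySem.Set.ofList xs) (fun y => y == x)
      have h1 : (PySem.Set.ofList xs).countP (fun y => y == x) = 1 := hcount
      unfold PySem.Set.discard
      rw [← List.countP_eq_length_filter]
      omega
    simp [hx, pvD, List.length_cons]
    omega
  · have : PySem.Set.discard (PySem.Set.ofList xs) x = PySem.Set.ofList xs := by
      unfold PySem.Set.discard
      apply List.filter_eq_self.2
      intro a ha
      simp only [ne_eq, Bool.not_eq_true', beq_eq_false_iff_ne]
      intro hax; rw [hax] at ha; rw [PySem.Set.mem_ofList] at ha; exact hx ha
    simp [hx, pvD, this]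

lemma pvD_eq_of_mem_iff (xs ys : List Char) (h : ∀ y, y ∈ xs ↔ y ∈ ys) : pvD xs = pvD ys := by
  have hp : (PySem.Set.ofList xs).Perm (PySem.Set.ofList ys) := by
    rw [List.perm_ext_iff_of_nodup (PySem.Set.nodup_ofList xs) (PySem.Set.nodup_ofList ys)]
    intro a; simp [PySem.Set.mem_ofList, h a]
  exact hp.length_eq

-- window basics
lemma pvW_succ_lo (cs : List Char) (nn k : Nat) (hk : k < cs.length) (h : k < nn) :
    pvW cs nn (k+1) = pvW cs nn k ++ [cs[k]] := by
  unfold pvW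
  have h1 : k - nn = 0 := by omega
  have h2 : k + 1 - nn = 0 := by omega
  rw [h1, h2, List.drop_zero, List.drop_zero, List.take_add_one]
  simp [hk]

lemma pvW_succ_hi (cs : List Char) (nn k : Nat) (hk : k < cs.length) (h : nn ≤ k) (hnn : 0 < nn) :
    pvW cs nn k = cs[k - nn]'(by omega) :: ((cs.take k).drop (k - nn + 1)) ∧
    pvW cs nn (k+1) = ((cs.take k).drop (k - nn + 1)) ++ [cs[k]] := by
  constructor
  · unfold pvW
    have hlt : k - nn < (cs.take k).length := by simp; omega
    rw [List.drop_eq_getElem_cons hlt]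
    congr 1
    rw [List.getElem_take]
  · unfold pvW
    have h2 : k + 1 - nn = (k - nn) + 1 := by omega
    rw [h2, List.take_add_one, List.drop_append_of_le_length (by simp; omega)]
    simp [hk]

-- membership of the window
lemma mem_pvW (cs : List Char) (nn k : Nat) (hk : k ≤ cs.length) (y : Char) :
    y ∈ pvW cs nn k ↔ ∃ m : Nat, k - nn ≤ m ∧ m < k ∧ ∃ hm : m < cs.length, y = cs[m] := by
  unfold pvW
  rw [List.mem_iff_getElem]
  constructor
  · rintro ⟨i, hi, rfl⟩
    refine ⟨k - nn + i, by omega, by simp at hi; omega, by simp at hi ⊢; omega, ?_⟩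
    rw [List.getElem_drop, List.getElem_take]
  · rintro ⟨m, hm1, hm2, hm3, rfl⟩
    refine ⟨m - (k - nn), by simp; omega, ?_⟩
    rw [List.getElem_drop, List.getElem_take]
    congr 1
    omega

-- A's inner loop: the set of the last nn characters has pvD (window) elements.
lemma pyRangeDown (a : Int) (nn : Nat) :
    PySem.List.pyRange a (a - nn) (-1) = (List.range nn).map (fun t : Nat => a - (t : Int)) := by
  unfold PySem.List.pyRange
  norm_num
  rcases Nat.eq_zero_or_pos nn with h | h
  · simp [h]
  · rw [if_pos h]
    apply List.map_congr_left
    intro t _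
    omega

lemma A_inner (cs : List Char) (nn k : Nat) (hk : k < cs.length) (hnk : nn ≤ k + 1) :
    ((PySem.List.pyRange (k : Int) ((k : Int) - (nn : Int)) (-1)).foldl
      (fun s j => PySem.Set.add s (PySem.List.pyGetD cs j ' ')) PySem.Set.empty).length
    = pvD (pvW cs nn (k+1)) := by
  rw [pyRangeDown,
      ← PySem.Set.update_map_eq_foldl_add (s := PySem.Set.empty)
        (f := fun j : Int => PySem.List.pyGetD cs j ' ')
        (l := (List.range nn).map (fun t : Nat => (k:Int) - (t:Int))),
      PySem.Set.update_empty, List.map_map]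
  apply pvD_eq_of_mem_iff
  intro y
  rw [mem_pvW cs nn (k+1) (by omega) y]
  simp only [List.mem_map, List.mem_range, Function.comp_apply]
  constructor
  · rintro ⟨t, ht, rfl⟩
    have h0 : (0:Int) ≤ (k:Int) - t := by omega
    have h1 : (k:Int) - t < cs.length := by omega
    rw [PySem.List.pyGetD_eq_getElem cs ' ' h0 h1]
    refine ⟨((k:Int) - t).toNat, by omega, by omega, by omega, rfl⟩
  · rintro ⟨m, hm1, hm2, hm3, rfl⟩
    refine ⟨k - m, by omega, ?_⟩
    have h0 : (0:Int) ≤ (k:Int) - (k - m : Nat) := by omega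
    have h1 : (k:Int) - (k - m : Nat) < cs.length := by omega
    rw [PySem.List.pyGetD_eq_getElem cs ' ' h0 h1]
    congr 1
    omega

-- A's loop equals pvFirst from k
lemma A_loop_eq (cs : List Char) (nn : Nat) :
    ∀ (m k : Nat), nn ≤ k + 1 → m = cs.length - k →
    process_buffer_loop cs (nn : Int) (PySem.List.pyRange (k : Int) (cs.length : Int)) =
      pvFirst cs nn k m := by
  intro m
  induction m with
  | zero =>
    intro k h1 h2
    have hle : (cs.length : Int) ≤ (k : Int) := by omega
    rw [PySem.List.pyRange_one_eq_nil hle]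
    rfl
  | succ m ih =>
    intro k h1 h2
    have hk : k < cs.length := by omega
    rw [PySem.List.pyRange_one_cons (by exact_mod_cast hk)]
    simp only [process_buffer_loop, pvFirst]
    rw [A_inner cs nn k hk h1]
    by_cases hEq : pvD (pvW cs nn (k+1)) = nn
    · rw [if_pos (by exact_mod_cast hEq), if_pos hEq]
    · rw [if_neg (by exact_mod_cast hEq), if_neg hEq]
      have : ((k : Int) + 1) = ((k + 1 : Nat) : Int) := by push_cast; ring
      rw [this]
      exact ih (k+1) (by omega) (by omega)

-- B's loop equals pvFirst from k, under the counter invariant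
lemma B_loop_eq (cs : List Char) (nn : Nat) (hnn : 0 < nn) :
    ∀ (t : List Char) (k : Nat) (counts : PySem.Dict Char Int),
      t = cs.drop k →
      (∀ c', counts.getD c' 0 = ((pvW cs nn k).count c' : Int)) →
      process_buffer_alt_loop cs (nn : Int) (PySem.List.enumerate t (k : Int)) counts
          ((pvD (pvW cs nn k) : Int)) =
        pvFirst cs nn k t.length := by
  intro t
  induction t with
  | nil =>
    intro k counts ht hcnt
    rfl
  | cons c t ih =>
    intro k counts ht hcnt
    have hk : k < cs.length := by
      by_contra hcon
      rw [List.drop_eq_nil_of_le (by omega)] at ht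
      exact List.cons_ne_nil c t ht
    have hdrop : cs.drop k = cs[k] :: cs.drop (k+1) := List.drop_eq_getElem_cons hk
    rw [hdrop] at ht
    injection ht with hc ht'
    -- one step of the loop
    show process_buffer_alt_loop cs (nn : Int)
        (((k : Int), c) :: PySem.List.enumerate t ((k : Int) + 1)) counts
        ((pvD (pvW cs nn k) : Int)) = pvFirst cs nn k (t.length + 1)
    simp only [process_buffer_alt_loop]
    set W := pvW cs nn k with hWdef
    -- counts1 invariant against W ++ [c]
    have hcnt1 : ∀ c', (counts.insert c (counts.getD c 0 + 1)).getD c' 0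
        = ((W ++ [c]).count c' : Int) := by
      intro c'
      rw [PySem.Dict.getD_insert]
      by_cases hcc : c' = c
      · subst hcc
        rw [if_pos rfl, hcnt c']
        simp [List.count_append]
      · rw [if_neg hcc, hcnt c']
        simp only [List.count_append, List.count_singleton]
        have : ¬ c = c' := fun h => hcc h.symm
        simp [this]
    -- distinct1 is the distinct count of W ++ [c]
    have hD1 : (if counts.getD c 0 + 1 = 1 then ((pvD W : Int)) + 1 else ((pvD W : Int)))
        = ((pvD (W ++ [c]) : Int)) := by
      rw [hcnt c, pvD_append_singleton]
      by_cases hmem : c ∈ W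
      · have : W.count c ≠ 0 := fun h => (List.count_eq_zero.mp h) hmem
        rw [if_neg (by omega), if_pos hmem]
      · have h0 : W.count c = 0 := List.count_eq_zero.2 hmem
        rw [h0, if_neg hmem]
        norm_num
    by_cases hcase : nn ≤ k
    · -- window is full: Python removes input[i-n]
      have hbr : ((nn : Int) ≤ (k : Int)) := by omega
      rw [if_pos hbr]
      obtain ⟨hWk, hWk1⟩ := pvW_succ_hi cs nn k hk hcase hnn
      set M := (cs.take k).drop (k - nn + 1) with hMdef
      set d0 := cs[k - nn]'(by omega) with hd0def
      have hgd : PySem.List.pyGetD cs ((k : Int) - (nn : Int)) ' ' = d0 := by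
        have h0 : (0:Int) ≤ (k:Int) - (nn:Int) := by omega
        have h1 : (k:Int) - (nn:Int) < cs.length := by omega
        rw [PySem.List.pyGetD_eq_getElem cs ' ' h0 h1]
        congr 1
        omega
      have hWc : W ++ [c] = d0 :: (M ++ [c]) := by
        rw [← hWdef] at hWk
        rw [hWk]; rfl
      have hW1 : pvW cs nn (k+1) = M ++ [c] := by rw [hWk1, hc]
      have hcd : (counts.insert c (counts.getD c 0 + 1)).getD d0 0 - 1
          = ((M ++ [c]).count d0 : Int) := by
        rw [hcnt1 d0, hWc]
        simp [List.count_cons]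
      have hD2 : (if (counts.insert c (counts.getD c 0 + 1)).getD
              (PySem.List.pyGetD cs ((k : Int) - (nn : Int)) ' ') 0 - 1 = 0
            then (if counts.getD c 0 + 1 = 1 then ((pvD W : Int)) + 1 else ((pvD W : Int))) - 1
            else (if counts.getD c 0 + 1 = 1 then ((pvD W : Int)) + 1 else ((pvD W : Int))))
          = ((pvD (pvW cs nn (k+1)) : Int)) := by
        rw [hD1, hgd, hcd, hW1, hWc, pvD_cons]
        by_cases hd : d0 ∈ M ++ [c]
        · have : (M ++ [c]).count d0 ≠ 0 := fun h => (List.count_eq_zero.mp h) hd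
          rw [if_pos hd, if_neg (by omega)]
        · have : (M ++ [c]).count d0 = 0 := List.count_eq_zero.2 hd
          rw [if_pos (by omega), if_neg hd]
          push_cast
          ring
      -- second dict invariant
      have hcnt2 : ∀ c', ((counts.insert c (counts.getD c 0 + 1)).insert
            (PySem.List.pyGetD cs ((k : Int) - (nn : Int)) ' ')
            ((counts.insert c (counts.getD c 0 + 1)).getD
              (PySem.List.pyGetD cs ((k : Int) - (nn : Int)) ' ') 0 - 1)).getD c' 0
          = ((pvW cs nn (k+1)).count c' : Int) := by
        intro c'
        rw [PySem.Dict.getD_insert, hgd, hW1]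
        by_cases hcc : c' = d0
        · subst hcc
          rw [if_pos rfl, hcd]
        · rw [if_neg hcc, hcnt1 c', hWc]
          have : c' ≠ d0 := hcc
          rw [List.count_cons_of_ne (fun h => hcc h.symm)]
      simp only [hD2]
      simp only [pvFirst]
      by_cases hEq : pvD (pvW cs nn (k+1)) = nn
      · rw [if_pos (by exact_mod_cast hEq), if_pos hEq]
      · rw [if_neg (by exact_mod_cast hEq), if_neg hEq]
        have hcast : ((k : Int) + 1) = ((k + 1 : Nat) : Int) := by push_cast; ring
        rw [hcast]
        exact ih (k+1) _ ht' hcnt2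
    · -- window still growing
      have hbr : ¬ ((nn : Int) ≤ (k : Int)) := by omega
      rw [if_neg hbr]
      have hW1 : pvW cs nn (k+1) = W ++ [c] := by
        rw [hc]; exact pvW_succ_lo cs nn k hk (by omega)
      have hD1' : (if counts.getD c 0 + 1 = 1 then ((pvD W : Int)) + 1 else ((pvD W : Int)))
          = ((pvD (pvW cs nn (k+1)) : Int)) := by rw [hD1, hW1]
      have hcnt1' : ∀ c', (counts.insert c (counts.getD c 0 + 1)).getD c' 0
          = ((pvW cs nn (k+1)).count c' : Int) := by
        intro c'; rw [hcnt1 c', hW1]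
      simp only [hD1']
      simp only [pvFirst]
      by_cases hEq : pvD (pvW cs nn (k+1)) = nn
      · rw [if_pos (by exact_mod_cast hEq), if_pos hEq]
      · rw [if_neg (by exact_mod_cast hEq), if_neg hEq]
        have hcast : ((k : Int) + 1) = ((k + 1 : Nat) : Int) := by push_cast; ring
        rw [hcast]
        exact ih (k+1) _ ht' hcnt1' 

-- below nn-1 the test never fires
lemma pvFirst_skip (cs : List Char) (nn : Nat) :
    ∀ (j : Nat), j + 1 ≤ nn → j ≤ cs.length →
    pvFirst cs nn 0 cs.length = pvFirst cs nn j (cs.length - j) := by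
  intro j
  induction j with
  | zero => intro _ _; simp
  | succ j ih =>
    intro h1 h2
    rw [ih (by omega) (by omega)]
    have hne : pvD (pvW cs nn (j+1)) ≠ nn := by
      have hle := pvD_le (pvW cs nn (j+1))
      have hlen : (pvW cs nn (j+1)).length ≤ j+1 := by
        simp only [pvW, List.length_drop, List.length_take]; omega
      omega
    have hfuel : cs.length - j = (cs.length - (j+1)) + 1 := by omega
    rw [hfuel]
    simp only [pvFirst]
    rw [if_neg hne]

lemma pvFirst_none (cs : List Char) (nn : Nat) :
    ∀ (m k : Nat), k + m ≤ nn - 1 → pvFirst cs nn k m = none := by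
  intro m
  induction m with
  | zero => intro k _; rfl
  | succ m ih =>
    intro k h
    have hne : pvD (pvW cs nn (k+1)) ≠ nn := by
      have hle := pvD_le (pvW cs nn (k+1))
      have hlen : (pvW cs nn (k+1)).length ≤ k+1 := by
        simp only [pvW, List.length_drop, List.length_take]; omega
      omega
    simp only [pvFirst]
    rw [if_neg hne]
    exact ih (k+1) (by omega)

-- the two loops agree for nn = 4 / 14
lemma main_eq (cs : List Char) (nn : Nat) (hnn : 0 < nn) :
    process_buffer_loop cs (nn : Int) (PySem.List.pyRange ((nn : Int) - 1) (cs.length : Int)) =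
      process_buffer_alt_loop cs (nn : Int) (PySem.List.enumerate cs 0) PySem.Dict.empty 0 := by
  have hB := B_loop_eq cs nn hnn cs 0 PySem.Dict.empty (by simp)
    (by intro c'; simp [PySem.Dict.getD_empty, pvW])
  have h0 : ((pvD (pvW cs nn 0) : Int)) = 0 := by simp [pvW, pvD, PySem.Set.ofList_nil]
  rw [h0] at hB
  simp only [Nat.cast_zero] at hB
  rw [hB]
  have hA := A_loop_eq cs nn (cs.length - (nn - 1)) (nn - 1) (by omega) rfl
  have hcast : ((nn : Int) - 1) = ((nn - 1 : Nat) : Int) := by omega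
  rw [hcast, hA]
  by_cases hlen : nn - 1 ≤ cs.length
  · exact (pvFirst_skip cs nn (nn - 1) (by omega) hlen).symm
  · rw [pvFirst_none cs nn (cs.length - (nn-1)) (nn-1) (by omega),
        pvFirst_none cs nn cs.length 0 (by omega)]

-- ===== VERDICT (by name: the statement is the Claim_ definition above) =====
theorem process_buffer_spec : Claim_equal_process_buffer := by
  intro input part _ hpre
  unfold Spec_process_buffer
  rcases hpre with h | h <;> subst h
  · show process_buffer input 1 = process_buffer_alt input 1
    unfold process_buffer process_buffer_alt
    norm_num
    have h := main_eq input.toList 4 (by norm_num)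
    norm_num at h
    exact h
  · show process_buffer input 2 = process_buffer_alt input 2
    unfold process_buffer process_buffer_alt
    norm_num
    have h := main_eq input.toList 14 (by norm_num)
    norm_num at h
    exact h
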